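-- pv_equiv track=rewrite | github.com/rakesh-050791/DS-Algo | Advance/Queues/24-November-2022.py | solve
-- ===== SOURCE A (Python) =====
-- from collections import deque
-- from collections import deque
-- from collections import deque
-- from collections import deque
--
-- def solve(A):
--     input = [1, 2]
--
--     myQueue = deque()
--
--     myQueue.append(1)
--     myQueue.append(2)
--
--     while A > 0:
--         element = myQueue.popleft() #Pops out the front of the queue
--
--         output = str(element) + str(element)[::-1]
--
--         for i in input:
--             myQueue.append(10*element + i)
--
--         A -= 1
--     return output
-- ===== SOURCE B (Python) =====
-- def solve(A):
--     # A-th number with digits 1/2 read off directly from the binary representation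
--     # of A+1 (drop the leading 1-bit; bit 0 -> digit '1', bit 1 -> digit '2').
--     t = ''.join('2' if c == '1' else '1' for c in bin(A + 1)[3:])
--     return t + t[::-1]
-- ===== Notes on version B (the rewrite author's own statement) =====
-- stated objective: faster
-- what changed: B computes the A-th digits-1/2 number directly from the binary representation of A+1 (bijective base-2) instead of simulating A steps of a BFS queue.
import Mathlib
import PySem

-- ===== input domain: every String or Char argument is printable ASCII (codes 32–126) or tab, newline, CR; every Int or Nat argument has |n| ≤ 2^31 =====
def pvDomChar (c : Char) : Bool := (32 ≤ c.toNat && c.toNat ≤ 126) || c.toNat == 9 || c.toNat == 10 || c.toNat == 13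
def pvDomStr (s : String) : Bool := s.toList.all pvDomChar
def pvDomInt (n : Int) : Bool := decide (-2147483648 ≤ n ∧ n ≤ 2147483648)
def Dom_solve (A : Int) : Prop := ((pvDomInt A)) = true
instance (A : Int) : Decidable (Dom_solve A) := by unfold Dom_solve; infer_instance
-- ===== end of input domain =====

-- B replaces A's O(A) BFS queue simulation by reading the answer directly off the
-- binary representation of A+1 (O(log A) work).

-- ===== PORT A =====
-- 'while A > 0' loop, fuel = A.toNat; the deque is the classic two-list functional
-- queue (front, back): popleft = take head of front (rotating back when empty),
-- append = cons onto back.  'output' is unassigned before the first iteration: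
-- Option String; none = UnboundLocalError (A ≤ 0), excluded by Pre_solve.
def solveLoop : Nat → List Int → List Int → Option String → Option String
  | 0, _, _, out => out
  | fuel+1, front, back, out =>
    match front with
    | [] =>
      match back.reverse with
      | [] => out   -- unreachable: the queue never shrinks below 2 elements
      | e :: rest =>
        let s := PySem.Int.toChars e                     -- str(element)
        let output := String.ofList (s ++ s.reverse)     -- str(element) + str(element)[::-1]
        -- for i in [1, 2]: myQueue.append(10*element + i)
        solveLoop fuel rest [10*e+2, 10*e+1] (some output)
    | e :: rest =>
      let s := PySem.Int.toChars e                     -- str(element)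
      let output := String.ofList (s ++ s.reverse)     -- str(element) + str(element)[::-1]
      -- for i in [1, 2]: myQueue.append(10*element + i)
      solveLoop fuel rest ((10*e+2) :: (10*e+1) :: back) (some output)

def solve (A : Int) : String := (solveLoop A.toNat [1, 2] [] none).getD ""

-- ===== PORT B =====
def solve_alt (A : Int) : String :=
  let s := (PySem.Int.toBinChars0b (A + 1)).drop 3                 -- bin(A + 1)[3:]
  let t := s.map (fun c => if c == '1' then '2' else '1')          -- ''.join('2' if c == '1' else '1' for c in s)
  String.ofList (t ++ t.reverse)                                   -- t + t[::-1]

-- ===== PRECONDITION & SPEC =====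
-- Python A raises UnboundLocalError ('output' never assigned) when A ≤ 0; exactly those inputs are excluded.
def Pre_solve (A : Int) : Prop := 1 ≤ A
instance (A : Int) : Decidable (Pre_solve A) := by unfold Pre_solve; infer_instance
def pvWitness_solve : Int := 3

def Spec_solve (A : Int) (out : String) : Prop := out = solve_alt A
instance (A : Int) (out : String) : Decidable (Spec_solve A out) := by unfold Spec_solve; infer_instance

-- ===== CLAIM (what is proved, stated in full; the proofs are below) =====
def Claim_equal_solve : Prop := ∀ (A : Int), Dom_solve A → Pre_solve A → Spec_solve A (solve A)

-- ===== LEMMAS AND PROOFS =====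

-- digits (from {'1','2'}) of the k-th number whose decimal digits are all 1 or 2
def bij : Nat → List Char
  | 0 => []
  | n+1 =>
    if (n+1) % 2 == 0 then bij ((n+1)/2 - 1) ++ ['2'] else bij ((n+1)/2) ++ ['1']
decreasing_by all_goals omega

lemma bij_odd (m : Nat) : bij (2*m+1) = bij m ++ ['1'] := by
  rw [show 2*m+1 = (2*m)+1 from rfl, bij]
  simp [show (2*m+1) % 2 = 1 from by omega, show (2*m+1) / 2 = m from by omega]

lemma bij_even (m : Nat) : bij (2*m+2) = bij m ++ ['2'] := by
  rw [show 2*m+2 = (2*m+1)+1 from rfl, bij]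
  simp [show (2*m+2) % 2 = 0 from by omega, show (2*m+2) / 2 - 1 = m from by omega]

-- mathematical digit-list function: base-b digits (b ≥ 2), most significant first
def dg (b n : Nat) : List Char :=
  if _h1 : b ≤ 1 then []
  else if _h2 : n < b then [Nat.digitChar n]
  else dg b (n / b) ++ [Nat.digitChar (n % b)]
termination_by n
decreasing_by exact Nat.div_lt_self (by omega) (by omega)

lemma dg_small {b n : Nat} (hb : 2 ≤ b) (h : n < b) : dg b n = [Nat.digitChar n] := by
  rw [dg]; simp [Nat.not_le.mpr (by omega : 1 < b), h]

lemma dg_step {b n : Nat} (hb : 2 ≤ b) (h : b ≤ n) :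
    dg b n = dg b (n / b) ++ [Nat.digitChar (n % b)] := by
  rw [dg]; simp [Nat.not_le.mpr (by omega : 1 < b), Nat.not_lt.mpr h]

lemma dg_ne_nil {b n : Nat} (hb : 2 ≤ b) : dg b n ≠ [] := by
  by_cases h : n < b
  · simp [dg_small hb h]
  · simp [dg_step hb (Nat.not_lt.mp h)]

-- Nat.toDigitsCore agrees with dg for positive n and enough fuel
lemma tdc (b : Nat) (hb : 2 ≤ b) :
    ∀ fuel n ds, 0 < n → n < fuel → Nat.toDigitsCore b fuel n ds = dg b n ++ ds := by
  intro fuel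
  induction fuel with
  | zero => intro n ds hn hf; omega
  | succ f ih =>
    intro n ds hn hf
    rw [Nat.toDigitsCore]
    by_cases h : n / b = 0
    · have hnb : n < b := by
        rcases Nat.lt_or_ge n b with h' | h'
        · exact h'
        · exact absurd h (by have := Nat.div_pos h' (by omega); omega)
      have hmod : n % b = n := Nat.mod_eq_of_lt hnb
      simp [h, hmod, dg_small hb hnb]
    · have hbn : b ≤ n := by
        by_contra hc
        exact h (Nat.div_eq_of_lt (Nat.not_le.mp hc))
      have hdiv_pos : 0 < n / b := Nat.pos_of_ne_zero h
      have hdiv_lt : n / b < f := by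
        have : n / b < n := Nat.div_lt_self hn (by omega)
        omega
      simp only [h, if_false]
      rw [ih (n / b) _ hdiv_pos hdiv_lt, dg_step hb hbn, List.append_assoc]
      rfl

lemma toDigits_eq_dg {b n : Nat} (hb : 2 ≤ b) (hn : 0 < n) : Nat.toDigits b n = dg b n :=
  by simpa using tdc b hb (n+1) n [] hn (by omega)

-- decimal value of a digit list of '1'/'2's, and the k-th number itself
def valNat (ds : List Char) : Nat := ds.foldl (fun a c => 10*a + (if c == '2' then 2 else 1)) 0

def fNat (k : Nat) : Nat := valNat (bij k)

lemma valNat_append (xs : List Char) (c : Char) :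
    valNat (xs ++ [c]) = 10 * valNat xs + (if c == '2' then 2 else 1) := by
  simp [valNat, List.foldl_append]

lemma fNat_odd (m : Nat) : fNat (2*m+1) = 10 * fNat m + 1 := by
  simp [fNat, bij_odd, valNat_append]

lemma fNat_even (m : Nat) : fNat (2*m+2) = 10 * fNat m + 2 := by
  simp [fNat, bij_even, valNat_append]

lemma fNat_pos (k : Nat) (h : 1 ≤ k) : 1 ≤ fNat k := by
  obtain ⟨m, rfl | rfl⟩ : ∃ m, k = 2*m+1 ∨ k = 2*m+2 := ⟨(k-1)/2, by omega⟩
  · rw [fNat_odd]; omega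
  · rw [fNat_even]; omega

-- A's popped values have exactly the digits bij k
lemma dg_fNat : ∀ k, 1 ≤ k → dg 10 (fNat k) = bij k := by
  intro k
  induction k using Nat.strong_induction_on with
  | _ k ih =>
    intro hk
    obtain ⟨m, rfl | rfl⟩ : ∃ m, k = 2*m+1 ∨ k = 2*m+2 := ⟨(k-1)/2, by omega⟩
    · rw [fNat_odd, bij_odd]
      by_cases hm : m = 0
      · subst hm; simp [fNat, bij, valNat, dg_small (by omega : (2:Nat) ≤ 10) (by omega : (1:Nat) < 10)]
        decide
      · have h1 : 1 ≤ fNat m := fNat_pos m (by omega)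
        rw [dg_step (by omega) (by omega)]
        have hd : (10 * fNat m + 1) / 10 = fNat m := by omega
        have hm10 : (10 * fNat m + 1) % 10 = 1 := by omega
        rw [hd, hm10, ih m (by omega) (by omega)]
        rfl
    · rw [fNat_even, bij_even]
      by_cases hm : m = 0
      · subst hm; simp [fNat, bij, valNat, dg_small (by omega : (2:Nat) ≤ 10) (by omega : (2:Nat) < 10)]
        decide
      · have h1 : 1 ≤ fNat m := fNat_pos m (by omega)
        rw [dg_step (by omega) (by omega)]
        have hd : (10 * fNat m + 2) / 10 = fNat m := by omega
        have hm10 : (10 * fNat m + 2) % 10 = 2 := by omega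
        rw [hd, hm10, ih m (by omega) (by omega)]
        rfl

lemma tail_append_singleton {xs : List Char} (c : Char) (h : xs ≠ []) :
    (xs ++ [c]).tail = xs.tail ++ [c] := by
  cases xs with
  | nil => exact absurd rfl h
  | cons x xs => rfl

-- B's digits: binary of k+1 with the leading bit dropped, 0 ↦ '1', 1 ↦ '2'
lemma dg2_tail : ∀ k, ((dg 2 (k+1)).tail).map (fun c => if c == '1' then '2' else '1') = bij k := by
  intro k
  induction k using Nat.strong_induction_on with
  | _ k ih =>
    by_cases hk : k = 0
    · subst hk
      simp [dg_small (by omega : (2:Nat) ≤ 2) (by omega : (1:Nat) < 2), bij]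
    · obtain ⟨m, hm1, rfl | rfl⟩ : ∃ m, 1 ≤ m ∧ (k = 2*m-1 ∨ k = 2*m) := by
        refine ⟨(k+1)/2, by omega, ?_⟩; omega
      · -- k+1 = 2m, even
        have he : 2*m-1+1 = 2*m := by omega
        rw [he, dg_step (by omega) (by omega)]
        have hd : 2*m/2 = m := by omega
        have hmod : 2*m % 2 = 0 := by omega
        rw [hd, hmod, tail_append_singleton _ (dg_ne_nil (by omega)),
            List.map_append]
        have : 2*m-1 = 2*(m-1)+1 := by omega
        rw [this, bij_odd]
        have hrec := ih (m-1) (by omega)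
        rw [show m-1+1 = m from by omega] at hrec
        rw [hrec]; rfl
      · -- k+1 = 2m+1, odd
        rw [show 2*m+1 = 2*m+1 from rfl, dg_step (by omega) (by omega)]
        have hd : (2*m+1)/2 = m := by omega
        have hmod : (2*m+1) % 2 = 1 := by omega
        rw [hd, hmod, tail_append_singleton _ (dg_ne_nil (by omega)), List.map_append]
        have : 2*m = 2*(m-1)+2 := by omega
        rw [this, bij_even]
        have hrec := ih (m-1) (by omega)
        rw [show m-1+1 = m from by omega] at hrec
        rw [hrec]; rfl

-- the Int values living in A's queue
def fInt (k : Nat) : Int := (fNat k : Int)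

lemma toChars_fInt (k : Nat) (hk : 1 ≤ k) : PySem.Int.toChars (fInt k) = bij k := by
  have h0 : ¬ (fInt k < 0) := by simp [fInt]
  have h1 : (fInt k).toNat = fNat k := by simp [fInt]
  rw [PySem.Int.toChars, if_neg h0, h1,
      toDigits_eq_dg (by omega) (by exact_mod_cast fNat_pos k hk), dg_fNat k hk]

lemma queue_step (j : Nat) :
    (List.range' (j+2) (j+1)).map fInt ++ [10 * fInt (j+1) + 1, 10 * fInt (j+1) + 2]
      = (List.range' (j+2) (j+3)).map fInt := by
  have h1 : fInt (2*j+3) = 10 * fInt (j+1) + 1 := by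
    have := fNat_odd (j+1)
    simp only [fInt]
    rw [show 2*j+3 = 2*(j+1)+1 from by omega, this]
    push_cast; ring
  have h2 : fInt (2*j+4) = 10 * fInt (j+1) + 2 := by
    have := fNat_even (j+1)
    simp only [fInt]
    rw [show 2*j+4 = 2*(j+1)+2 from by omega, this]
    push_cast; ring
  have hr : List.range' (j+2) (j+3) = List.range' (j+2) (j+1) ++ List.range' (2*j+3) 2 := by
    rw [show 2*j+3 = (j+2)+1*(j+1) from by omega, List.range'_append]
  rw [hr, List.map_append, ← h1, ← h2]
  rfl

lemma rotate (fuel : Nat) (back : List Int) (out : Option String) :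
    solveLoop (fuel+1) [] back out = solveLoop (fuel+1) back.reverse [] out := by
  cases h : back.reverse with
  | nil => simp [solveLoop, h]
  | cons e rest => simp [solveLoop, h]

lemma step_cons (fuel : Nat) (e : Int) (rest back : List Int) (out : Option String) :
    solveLoop (fuel+1) (e :: rest) back out
      = solveLoop fuel rest ((10*e+2) :: (10*e+1) :: back)
          (some (String.ofList (PySem.Int.toChars e ++ (PySem.Int.toChars e).reverse))) := rfl

lemma loop_main : ∀ (fuel j : Nat) (e : Int) (rest back : List Int) (out : Option String),
    e :: rest ++ back.reverse = (List.range' (j+1) (j+2)).map fInt →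
    solveLoop (fuel+1) (e :: rest) back out
      = some (String.ofList (bij (j+fuel+1) ++ (bij (j+fuel+1)).reverse)) := by
  intro fuel
  induction fuel with
  | zero =>
    intro j e rest back out h
    rw [List.range'_succ, List.map_cons] at h
    injection h with he hrest
    simp only [solveLoop]
    rw [he, toChars_fInt (j+1) (by omega), show j+0+1 = j+1 from by omega]
  | succ f ih =>
    intro j e rest back out h
    rw [List.range'_succ, List.map_cons] at h
    injection h with he hrest
    rw [List.append_eq, show j+1+1 = j+2 from rfl] at hrest
    have hq : rest ++ ((10*e+2) :: (10*e+1) :: back).reverse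
        = (List.range' (j+2) (j+3)).map fInt := by
      rw [show ((10*e+2) :: (10*e+1) :: back).reverse
            = back.reverse ++ [10*e+1, 10*e+2] from by simp,
          ← List.append_assoc, hrest, he, queue_step]
    rw [step_cons, show j+(f+1)+1 = (j+1)+f+1 from by omega]
    cases rest with
    | nil =>
      have hrev : ((10*e+2) :: (10*e+1) :: back).reverse
          = (List.range' (j+2) (j+3)).map fInt := by simpa using hq
      rw [rotate, hrev, List.range'_succ, List.map_cons]
      exact ih (j+1) _ _ [] _ (by
        simp only [List.reverse_nil, List.append_nil]
        conv_rhs => rw [List.range'_succ, List.map_cons])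
    | cons e' rest' =>
      exact ih (j+1) e' rest' _ _ hq

lemma solve_eq_bij (A : Int) (hA : 1 ≤ A) :
    solve A = String.ofList (bij A.toNat ++ (bij A.toNat).reverse) := by
  obtain ⟨n, hn⟩ : ∃ n, A.toNat = n + 1 := ⟨A.toNat - 1, by omega⟩
  have f1 : fInt 1 = 1 := by
    simp [fInt, fNat, valNat, show bij 1 = bij 0 ++ ['1'] from bij_odd 0, bij]
  have f2 : fInt 2 = 2 := by
    simp [fInt, fNat, valNat, show bij 2 = bij 0 ++ ['2'] from bij_even 0, bij]
  have h : (1 : Int) :: [2] ++ ([] : List Int).reverse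
      = (List.range' (0+1) (0+2)).map fInt := by
    simp [List.range', f1, f2]
  rw [solve, hn, show ([1, 2] : List Int) = (1 : Int) :: [2] from rfl,
      loop_main n 0 1 [2] [] none h]
  simp

lemma solve_alt_eq_bij (A : Int) (hA : 1 ≤ A) :
    solve_alt A = String.ofList (bij A.toNat ++ (bij A.toNat).reverse) := by
  rw [solve_alt]
  have hpos : ¬ (A + 1 < 0) := by omega
  have htn : (A+1).toNat = A.toNat + 1 := by omega
  simp only [PySem.Int.toBinChars0b, if_neg hpos, htn]
  rw [show (('0' :: 'b' :: Nat.toDigits 2 (A.toNat+1)).drop 3) = (Nat.toDigits 2 (A.toNat+1)).drop 1 from rfl,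
      toDigits_eq_dg (by omega) (by omega), ← List.tail_drop, List.drop_zero, dg2_tail A.toNat]

-- ===== VERDICT (by name: the statement is the Claim_ definition above) =====
theorem solve_spec : Claim_equal_solve := by
  intro A _ hPre
  unfold Spec_solve
  rw [solve_eq_bij A hPre, solve_alt_eq_bij A hPre]
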